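-- pv_equiv track=rewrite | github.com/BrooksLabUCSC/flair | src/flair/flair_transcriptome.py | get_exons_from_juncs
-- ===== SOURCE A (Python) =====
-- def get_exons_from_juncs(juncs, start, end):
--     if len(juncs) == 0:
--         exon_starts = [0]
--         exon_sizes = [end - start]
--     else:
--         exon_starts = [0] + [x[1] - start for x in juncs]
--         exon_sizes = [juncs[0][0] - start] + [juncs[i + 1][0] - juncs[i][1] for i in range(len(juncs) - 1)] + [
--             end - juncs[-1][1]]
--     return exon_starts, exon_sizes
-- ===== SOURCE B (Python) =====
-- def get_exons_from_juncs(juncs, start, end):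
--     exon_starts = [0]
--     exon_sizes = []
--     prev_end = start
--     for j in juncs:
--         exon_sizes.append(j[0] - prev_end)
--         exon_starts.append(j[1] - start)
--         prev_end = j[1]
--     exon_sizes.append(end - prev_end)
--     return exon_starts, exon_sizes
-- ===== Notes on version B (the rewrite author's own statement) =====
-- stated objective: simpler
-- what changed: Replaced A's empty/non-empty branch split with its index-based pairwise differencing (juncs[i+1][0]-juncs[i][1] over range(len-1)) by one uniform accumulator pass carrying prev_end, which handles the empty case with no special branch.
import Mathlib
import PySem

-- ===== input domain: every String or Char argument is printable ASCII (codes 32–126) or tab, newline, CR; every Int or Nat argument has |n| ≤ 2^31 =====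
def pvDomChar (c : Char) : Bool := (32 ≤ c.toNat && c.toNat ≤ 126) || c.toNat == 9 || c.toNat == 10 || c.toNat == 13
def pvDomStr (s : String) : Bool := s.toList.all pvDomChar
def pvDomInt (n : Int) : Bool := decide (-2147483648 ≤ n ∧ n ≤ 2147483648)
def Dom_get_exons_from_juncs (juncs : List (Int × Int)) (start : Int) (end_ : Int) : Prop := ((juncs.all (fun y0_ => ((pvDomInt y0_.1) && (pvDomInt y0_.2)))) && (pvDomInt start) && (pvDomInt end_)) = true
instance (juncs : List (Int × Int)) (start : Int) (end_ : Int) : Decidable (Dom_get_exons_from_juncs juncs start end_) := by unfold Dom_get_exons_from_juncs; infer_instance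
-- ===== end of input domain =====

-- B replaces A's empty/non-empty branch split and index-based pairwise differencing
-- with one uniform accumulator pass carrying prev_end (objective: simpler).

-- ===== PORT A =====
def get_exons_from_juncs (juncs : List (Int × Int)) (start : Int) (end_ : Int) : List Int × List Int :=
  if juncs.length == 0 then
    ([0], [end_ - start])
  else
    let exon_starts := [0] ++ juncs.map (fun x => x.2 - start)
    let exon_sizes :=
      [(PySem.List.pyGetD juncs 0 (0, 0)).1 - start]
      ++ (PySem.List.pyRange 0 ((juncs.length : Int) - 1) 1).map
           (fun i => (PySem.List.pyGetD juncs (i + 1) (0, 0)).1 - (PySem.List.pyGetD juncs i (0, 0)).2)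
      ++ [end_ - (PySem.List.pyGetD juncs (-1) (0, 0)).2]
    (exon_starts, exon_sizes)

-- ===== PORT B =====
def get_exons_from_juncs_alt (juncs : List (Int × Int)) (start : Int) (end_ : Int) : List Int × List Int :=
  let st := juncs.foldl
    (fun (st : List Int × List Int × Int) j =>
      (st.1 ++ [j.2 - start], st.2.1 ++ [j.1 - st.2.2], j.2))
    ([0], [], start)
  (st.1, st.2.1 ++ [end_ - st.2.2])

-- ===== PRECONDITION & SPEC =====
def Spec_get_exons_from_juncs (juncs : List (Int × Int)) (start : Int) (end_ : Int) (out : List Int × List Int) : Prop := out = get_exons_from_juncs_alt juncs start end_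
instance (juncs : List (Int × Int)) (start : Int) (end_ : Int) (out : List Int × List Int) : Decidable (Spec_get_exons_from_juncs juncs start end_ out) := by unfold Spec_get_exons_from_juncs; infer_instance

-- ===== CLAIM =====
def Claim_equal_get_exons_from_juncs : Prop := ∀ (juncs : List (Int × Int)) (start : Int) (end_ : Int), Dom_get_exons_from_juncs juncs start end_ → Spec_get_exons_from_juncs juncs start end_ (get_exons_from_juncs juncs start end_)

-- ===== LEMMAS AND PROOFS =====

/-- Sizes of the internal exons plus the first one, recursively: gap from `p` to each junction. -/
def pvGaps : Int → List (Int × Int) → List Int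
  | _, [] => []
  | p, j :: t => (j.1 - p) :: pvGaps j.2 t

/-- The end coordinate of the last junction, or `p` if there is none. -/
def pvLastSnd : Int → List (Int × Int) → Int
  | p, [] => p
  | _, j :: t => pvLastSnd j.2 t

theorem pv_foldB (start : Int) (js : List (Int × Int)) :
    ∀ (a1 a2 : List Int) (p : Int),
      js.foldl (fun (st : List Int × List Int × Int) j =>
          (st.1 ++ [j.2 - start], st.2.1 ++ [j.1 - st.2.2], j.2)) (a1, a2, p)
      = (a1 ++ js.map (fun j => j.2 - start), a2 ++ pvGaps p js, pvLastSnd p js) := by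
  induction js with
  | nil => intro a1 a2 p; simp [pvGaps, pvLastSnd]
  | cons j t ih =>
      intro a1 a2 p
      simp only [List.foldl_cons, ih, pvGaps, pvLastSnd, List.map_cons]
      simp

theorem pv_getLast_snd (t : List (Int × Int)) : ∀ (j : Int × Int) (h : (j :: t) ≠ []),
    ((j :: t).getLast h).2 = pvLastSnd j.2 t := by
  induction t with
  | nil => intro j h; simp [pvLastSnd]
  | cons k t ih =>
      intro j h
      rw [List.getLast_cons (by simp)]
      exact ih k (by simp)

theorem pv_lastSnd_eq (t : List (Int × Int)) (j : Int × Int) :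
    (PySem.List.pyGetD (j :: t) (-1) (0, 0)).2 = pvLastSnd j.2 t := by
  rw [PySem.List.pyGetD_neg_one (j :: t) (0, 0) (by simp)]
  exact pv_getLast_snd t j (by simp)

theorem pv_gaps_eq (t : List (Int × Int)) : ∀ (j : Int × Int),
    (PySem.List.pyRange 0 (t.length : Int) 1).map
        (fun i => (PySem.List.pyGetD (j :: t) (i + 1) (0, 0)).1
                  - (PySem.List.pyGetD (j :: t) i (0, 0)).2)
      = pvGaps j.2 t := by
  induction t with
  | nil => intro j; simp [PySem.List.pyRange_one_eq_nil, pvGaps]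
  | cons k t ih =>
      intro j
      rw [show ((k :: t).length : Int) = (t.length : Int) + 1 by push_cast [List.length_cons]; ring]
      rw [PySem.List.pyRange_one_cons (by positivity)]
      simp only [List.map_cons, pvGaps]
      congr 1
      · rw [show (0 : Int) + 1 = ((1 : Nat) : Int) from by norm_num,
          PySem.List.pyGetD_natCast, PySem.List.pyGetD_zero_cons]
        simp [List.getD]
      · rw [← ih k]
        have h1 : PySem.List.pyRange (0 + 1) ((t.length : Int) + 1) 1
            = (List.range t.length).map (fun m : Nat => ((1 : Int) + m)) := by
          rw [PySem.List.pyRange_one,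
            show ((t.length : Int) + 1 - (0 + 1)).toNat = t.length from by omega]
          exact List.map_congr_left (fun m _ => by push_cast; ring)
        have h2 : PySem.List.pyRange 0 (t.length : Int) 1
            = (List.range t.length).map (fun m : Nat => ((0 : Int) + m)) := by
          rw [PySem.List.pyRange_one,
            show ((t.length : Int) - 0).toNat = t.length from by omega]
        rw [h1, h2, List.map_map, List.map_map]
        refine List.map_congr_left ?_
        intro m _
        simp only [Function.comp_apply]
        rw [show (1 : Int) + m + 1 = ((m + 2 : Nat) : Int) from by push_cast; ring,
          show (1 : Int) + m = ((m + 1 : Nat) : Int) from by push_cast; ring,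
          show (0 : Int) + m + 1 = ((m + 1 : Nat) : Int) from by push_cast; ring,
          show (0 : Int) + (m : Int) = ((m : Nat) : Int) from by ring]
        simp only [PySem.List.pyGetD_natCast]
        simp [List.getD]

-- ===== VERDICT =====
theorem get_exons_from_juncs_spec : Claim_equal_get_exons_from_juncs := by
  intro juncs start end_ _
  unfold Spec_get_exons_from_juncs
  cases juncs with
  | nil => simp [get_exons_from_juncs, get_exons_from_juncs_alt]
  | cons j t =>
      simp only [get_exons_from_juncs, get_exons_from_juncs_alt, pv_foldB]
      rw [if_neg (by simp)]
      refine Prod.ext ?_ ?_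
      · simp
      · simp only [pvGaps, pvLastSnd, PySem.List.pyGetD_zero_cons]
        rw [show ((j :: t).length : Int) - 1 = (t.length : Int) by push_cast [List.length_cons]; ring]
        rw [pv_gaps_eq t j, pv_lastSnd_eq t j]
        simp
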